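-- pv_equiv track=rewrite | github.com/Elisa-Correa/ayed1-2025-tps | TP3/ejercicio1.py | columnas_palindromas
-- ===== SOURCE A (Python) =====
-- def columnas_palindromas(matriz: list[list[int]]) -> list[int]:
--     """
--     Pre:
--         - Recibe una matriz (lista de listas de enteros) no vacía y bien formada.
--
--     Post:
--         - Devuelve una lista de enteros con los índices (0-base) de las columnas
--           que son palíndromos (capicúas).
--     """
--
--     cant_filas = len(matriz)
--     cant_columnas = len(matriz[0])
--
--     if cant_filas <= 1:
--         return list(range(cant_columnas))
--
--     indices_palindromos = []
--
--     for j in range(cant_columnas):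
--         columna = [matriz[i][j] for i in range(cant_filas)]
--         if columna == columna[::-1]:
--             indices_palindromos.append(j)
--
--     return indices_palindromos
-- ===== SOURCE B (Python) =====
-- def columnas_palindromas(matriz: list[list[int]]) -> list[int]:
--     n = len(matriz)
--     half = n // 2
--     res = []
--     for j in range(len(matriz[0])):
--         i = 0
--         while i < half and matriz[i][j] == matriz[n - 1 - i][j]:
--             i += 1
--         if i == half:
--             res.append(j)
--     return res
-- ===== Notes on version B (the rewrite author's own statement) =====
-- stated objective: alternative
-- what changed: Instead of materializing each column and its reversed copy and comparing the two lists, B runs a two-pointer scan per column, comparing matriz[i][j] with matriz[n-1-i][j] for i up to n//2 and stopping at the first mismatch; no column list is ever built and the single-row special case disappears.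
import Mathlib
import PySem

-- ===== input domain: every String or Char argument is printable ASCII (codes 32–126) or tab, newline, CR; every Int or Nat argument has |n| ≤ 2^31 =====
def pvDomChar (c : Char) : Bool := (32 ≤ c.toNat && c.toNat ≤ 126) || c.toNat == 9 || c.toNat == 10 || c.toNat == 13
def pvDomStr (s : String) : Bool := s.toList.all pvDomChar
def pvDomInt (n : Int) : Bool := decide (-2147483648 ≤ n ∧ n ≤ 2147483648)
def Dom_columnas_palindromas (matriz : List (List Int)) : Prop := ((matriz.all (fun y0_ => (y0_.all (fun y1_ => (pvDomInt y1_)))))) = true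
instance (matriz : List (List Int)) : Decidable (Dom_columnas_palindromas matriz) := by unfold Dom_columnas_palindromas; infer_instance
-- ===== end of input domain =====

-- B replaces build-column-then-compare-with-its-reversal by an in-place two-pointer
-- scan per column that stops at the first mismatch (objective: alternative).

-- ===== PORT A =====
-- pyGetD defaults never fire under Pre_ (all indices in range there); exact on Pre_.
def columnas_palindromas (matriz : List (List Int)) : List Int :=
  let cantFilas : Int := matriz.length
  let cantColumnas : Int := (PySem.List.pyGetD matriz 0 []).length
  if cantFilas ≤ 1 then PySem.List.pyRange 0 cantColumnas 1
  else
    (PySem.List.pyRange 0 cantColumnas 1).foldl (fun acc j =>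
      let columna := (PySem.List.pyRange 0 cantFilas 1).map
        (fun i => PySem.List.pyGetD (PySem.List.pyGetD matriz i []) j 0)
      if columna = (PySem.List.slice? columna none none (-1)).getD []
      then acc ++ [j] else acc) []

-- ===== PORT B =====
def pvGet (matriz : List (List Int)) (i j : Int) : Int :=
  PySem.List.pyGetD (PySem.List.pyGetD matriz i []) j 0

-- the 'while i < half and matriz[i][j] == matriz[n-1-i][j]: i += 1' loop (fuel = half)
def pvScan (matriz : List (List Int)) (n j : Int) : Nat → Int → Int
  | 0, i => i
  | fuel+1, i =>
    if i < PySem.Int.floordiv n 2 ∧ pvGet matriz i j = pvGet matriz (n - 1 - i) j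
    then pvScan matriz n j fuel (i + 1) else i

def columnas_palindromas_alt (matriz : List (List Int)) : List Int :=
  let n : Int := matriz.length
  let half : Int := PySem.Int.floordiv n 2
  (PySem.List.pyRange 0 (PySem.List.pyGetD matriz 0 []).length 1).foldl
    (fun res j => if pvScan matriz n j half.toNat 0 = half then res ++ [j] else res) []

-- ===== PRECONDITION & SPEC =====
-- Exactly where the Python A returns: a nonempty matrix whose every row is at least
-- as long as the first row (otherwise matriz[0] resp. matriz[i][j] raises IndexError).
def Pre_columnas_palindromas (matriz : List (List Int)) : Prop :=
  matriz ≠ [] ∧ ∀ row ∈ matriz, (matriz.headD []).length ≤ row.length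
instance (matriz : List (List Int)) : Decidable (Pre_columnas_palindromas matriz) := by
  unfold Pre_columnas_palindromas; infer_instance

def pvWitness_columnas_palindromas : List (List Int) := [[1, 2], [1, 3]]

def Spec_columnas_palindromas (matriz : List (List Int)) (out : List Int) : Prop := out = columnas_palindromas_alt matriz
instance (matriz : List (List Int)) (out : List Int) : Decidable (Spec_columnas_palindromas matriz out) := by unfold Spec_columnas_palindromas; infer_instance

-- ===== CLAIM (what is proved, stated in full; the proofs are below) =====
def Claim_equal_columnas_palindromas : Prop := ∀ (matriz : List (List Int)), Dom_columnas_palindromas matriz → Pre_columnas_palindromas matriz → Spec_columnas_palindromas matriz (columnas_palindromas matriz)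

-- ===== LEMMAS AND PROOFS =====

-- a list of length N equals its reverse iff the first half mirrors the second half
lemma palin_iff (g : Nat → Int) (N : Nat) :
    ((List.range N).map g = ((List.range N).map g).reverse) ↔
      (∀ k, k < N / 2 → g k = g (N - 1 - k)) := by
  constructor
  · intro h k hk
    have hkN : k < N := by omega
    have h2 : N - 1 - k < N := by omega
    have heq : ((List.range N).map g)[k]? = (((List.range N).map g).reverse)[k]? := by
      rw [← h]
    rw [List.getElem?_reverse (by simpa using hkN)] at heq
    simp only [List.length_map, List.length_range, List.getElem?_map,
      List.getElem?_range, hkN, h2] at heq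
    exact Option.some.inj heq
  · intro h
    apply List.ext_getElem (by simp)
    intro i h1 h2
    have hiN : i < N := by simpa using h1
    rw [List.getElem_reverse]
    simp only [List.getElem_map, List.getElem_range, List.length_map, List.length_range]
    rcases lt_or_ge i (N / 2) with hi | hi
    · exact h i hi
    · rcases Nat.lt_or_ge (N - 1 - i) (N / 2) with hk | hk
      · have := h (N - 1 - i) hk
        rw [this]
        congr 1
        omega
      · have : i = N - 1 - i := by omega
        rw [← this]

-- the two-pointer scan reaches half iff all remaining mirrored pairs agree
lemma pvScan_spec (matriz : List (List Int)) (j : Int) (N : Nat) :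
    ∀ (fuel i0 : Nat), i0 + fuel = N / 2 →
      (pvScan matriz (N : Int) j fuel (i0 : Int) = ((N / 2 : Nat) : Int) ↔
        ∀ k : Nat, i0 ≤ k → k < N / 2 →
          pvGet matriz (k : Int) j = pvGet matriz ((N : Int) - 1 - (k : Int)) j) := by
  intro fuel
  induction fuel with
  | zero =>
    intro i0 h0
    simp only [pvScan]
    constructor
    · intro _ k hk1 hk2; omega
    · intro _; omega
  | succ fuel ih =>
    intro i0 h0
    have hfd : PySem.Int.floordiv (N : Int) 2 = ((N / 2 : Nat) : Int) := by
      exact_mod_cast PySem.Int.floordiv_natCast N 2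
    have hlt : (i0 : Int) < PySem.Int.floordiv (N : Int) 2 := by
      rw [hfd]; exact_mod_cast (by omega : i0 < N / 2)
    simp only [pvScan]
    by_cases hc : pvGet matriz (i0 : Int) j = pvGet matriz ((N : Int) - 1 - (i0 : Int)) j
    · rw [if_pos ⟨hlt, hc⟩]
      have : ((i0 : Int) + 1) = ((i0 + 1 : Nat) : Int) := by push_cast; ring
      rw [this, ih (i0 + 1) (by omega)]
      constructor
      · intro h k hk1 hk2
        rcases Nat.eq_or_lt_of_le hk1 with rfl | hk1'
        · exact hc
        · exact h k hk1' hk2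
      · intro h k hk1 hk2; exact h k (by omega) hk2
    · rw [if_neg (by intro h; exact hc h.2)]
      constructor
      · intro h
        exfalso
        omega
      · intro h
        exact absurd (h i0 (le_refl _) (by omega)) hc

-- per column, A's palindrome test equals B's scan test
lemma cond_iff (matriz : List (List Int)) (j : Int) :
    (((PySem.List.pyRange 0 (matriz.length : Int) 1).map (fun i => pvGet matriz i j)) =
      ((PySem.List.pyRange 0 (matriz.length : Int) 1).map (fun i => pvGet matriz i j)).reverse) ↔
    pvScan matriz (matriz.length : Int) j
        (PySem.Int.floordiv (matriz.length : Int) 2).toNat 0 =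
      PySem.Int.floordiv (matriz.length : Int) 2 := by
  set N := matriz.length with hN
  have hfd : PySem.Int.floordiv (N : Int) 2 = ((N / 2 : Nat) : Int) := by
    exact_mod_cast PySem.Int.floordiv_natCast N 2
  rw [PySem.List.pyRange_one, List.map_map]
  simp only [Function.comp_def, Int.sub_zero, Int.toNat_natCast, zero_add]
  rw [palin_iff (fun k : Nat => pvGet matriz (k : Int) j) N]
  simp only [hfd, Int.toNat_natCast]
  have hscan := pvScan_spec matriz j N (N / 2) 0 (by omega)
  simp only [Nat.cast_zero] at hscan
  rw [hscan]
  constructor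
  · intro h k _ hk2
    have hcast : ((N - 1 - k : Nat) : Int) = (N : Int) - 1 - (k : Int) := by omega
    rw [← hcast]; exact h k hk2
  · intro h k hk2
    have hcast : ((N - 1 - k : Nat) : Int) = (N : Int) - 1 - (k : Int) := by omega
    rw [hcast]; exact h k (Nat.zero_le _) hk2

-- ===== VERDICT (by name: the statement is the Claim_ definition above) =====
theorem columnas_palindromas_spec : Claim_equal_columnas_palindromas := by
  intro matriz _ _
  unfold Spec_columnas_palindromas columnas_palindromas columnas_palindromas_alt
  simp only []
  set N := matriz.length with hN
  have hfd : PySem.Int.floordiv (N : Int) 2 = ((N / 2 : Nat) : Int) := by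
    exact_mod_cast PySem.Int.floordiv_natCast N 2
  by_cases h1 : (N : Int) ≤ 1
  · rw [if_pos h1]
    have hN1 : N ≤ 1 := by exact_mod_cast h1
    have hhalf : N / 2 = 0 := by omega
    have hcond : ∀ j : Int,
        pvScan matriz (N : Int) j (PySem.Int.floordiv (N : Int) 2).toNat 0 =
          PySem.Int.floordiv (N : Int) 2 := by
      intro j
      have hfuel : (PySem.Int.floordiv (N : Int) 2).toNat = 0 := by
        rw [hfd, hhalf]; rfl
      rw [hfuel, hfd, hhalf]; rfl
    rw [PySem.List.foldl_append_ite_eq_filter]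
    rw [List.nil_append]
    symm
    rw [List.filter_eq_self]
    intro j _
    exact decide_eq_true (hcond j)
  · rw [if_neg h1]
    refine PySem.List.foldl_congr_mem _ _ _ _ ?_
    intro acc j hj
    simp only [PySem.List.slice?_none_none_neg_one, Option.getD_some]
    have hiff := cond_iff matriz j
    rw [← hN] at hiff
    exact if_congr hiff rfl rfl
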